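-- pv_equiv track=rewrite | github.com/yukikitayama/leetcode-python | daily-challenge/daily_1568_minimum_number_of_days_to_disconnect_island.py | minDays1
-- ===== SOURCE A (Python) =====
-- from typing import List
--
-- def minDays1(grid: List[List[int]]) -> int:
--
--     def count_islands():
--         visited = set()
--         count = 0
--         for r in range(len(grid)):
--             for c in range(len(grid[0])):
--                 if grid[r][c] == 1 and (r, c) not in visited:
--                     explore(r, c, visited)
--                     count += 1
--         return count
--
--     def explore(r, c, visited):
--         if (
--                 r < 0 or r >= len(grid)
--                 or c < 0 or c >= len(grid[0])
--                 or grid[r][c] == 0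
--                 or (r, c) in visited
--         ):
--             return
--         visited.add((r, c))
--         for dr, dc in [(0, 1), (0, -1), (1, 0), (-1, 0)]:
--             explore(r + dr, c + dc, visited)
--
--     # Edge case: Already disconnected
--     if count_islands() != 1:
--         return 0
--
--     # Flood fill
--     for r in range(len(grid)):
--         for c in range(len(grid[0])):
--             if grid[r][c] == 1:
--                 grid[r][c] = 0
--                 # Try flood fill for each flip
--                 if count_islands() != 1:
--                     return 1
--                 # Backtrack
--                 grid[r][c] = 1
--
--     # Thinnest cross-section at most 2
--     return 2
-- ===== SOURCE B (Python) =====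
-- def minDays1(grid):
--     rows = len(grid)
--     cols = len(grid[0]) if grid else 0
--
--     def components(skip):
--         visited = set()
--         count = 0
--         for r0 in range(rows):
--             for c0 in range(cols):
--                 if grid[r0][c0] == 1 and (r0, c0) != skip and (r0, c0) not in visited:
--                     count += 1
--                     stack = [(r0, c0)]
--                     while stack:
--                         r, c = stack.pop()
--                         if (r < 0 or r >= rows or c < 0 or c >= cols
--                                 or (r, c) == skip or grid[r][c] == 0
--                                 or (r, c) in visited):
--                             continue
--                         visited.add((r, c))
--                         stack.extend([(r - 1, c), (r + 1, c), (r, c - 1), (r, c + 1)])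
--         return count
--
--     if components(None) != 1:
--         return 0
--     if any(grid[r][c] == 1 and components((r, c)) != 1
--            for r in range(rows) for c in range(cols)):
--         return 1
--     return 2
-- ===== Notes on version B (the rewrite author's own statement) =====
-- stated objective: alternative
-- what changed: A's recursive DFS flood fill with mutate-and-backtrack (set grid[r][c]=0, recount, restore) is replaced by an iterative explicit-stack flood fill over a pure view of the grid that treats one 'skip' cell as water, so B never mutates the grid and cannot hit Python's recursion limit.
import Mathlib
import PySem

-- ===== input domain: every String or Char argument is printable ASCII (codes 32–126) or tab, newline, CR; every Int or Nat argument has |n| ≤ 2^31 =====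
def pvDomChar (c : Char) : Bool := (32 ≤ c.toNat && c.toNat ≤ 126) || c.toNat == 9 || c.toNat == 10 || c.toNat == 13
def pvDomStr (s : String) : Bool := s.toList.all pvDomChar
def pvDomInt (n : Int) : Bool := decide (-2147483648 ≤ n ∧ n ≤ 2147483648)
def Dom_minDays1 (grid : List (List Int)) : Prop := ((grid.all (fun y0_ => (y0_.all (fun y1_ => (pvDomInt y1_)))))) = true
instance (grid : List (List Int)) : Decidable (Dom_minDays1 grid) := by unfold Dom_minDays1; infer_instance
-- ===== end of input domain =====

-- B replaces A's recursive DFS with mutate-and-backtrack by an iterative explicit-stack flood fill over a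
-- pure view of the grid (a 'skip' cell instead of flipping a cell in place); same asymptotic cost.
-- Equivalence is about the RETURN value only: Python A mutates its argument (a flipped cell stays 0 when A
-- returns 1), B never mutates.

-- ===== PORT A =====
-- grid[r][c] via Python indexing; exact under Pre_ (no ragged rows): every read executed by either Python
-- is then in range, so the getD defaults are never the value Python sees.
def getCell (g : List (List Int)) (r c : Int) : Int :=
  (PySem.List.pyGet? ((PySem.List.pyGet? g r).getD []) c).getD 0

-- termination-measure helpers for the ports' flood fills (not part of either algorithm's data)
def allCells (R C : Nat) : List (Int × Int) :=
  (PySem.List.pyRange 0 (R : Int) 1).flatMap (fun i => (PySem.List.pyRange 0 (C : Int) 1).map (fun j => (i, j)))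

def freeCnt (R C : Nat) (v : List (Int × Int)) : Nat :=
  ((allCells R C).filter (fun p => decide (p ∉ v))).length

-- these two stay above the ports because loopB's termination proof cites them
theorem mem_allCells (R C : Nat) (r c : Int) :
    (r, c) ∈ allCells R C ↔ 0 ≤ r ∧ r < (R : Int) ∧ 0 ≤ c ∧ c < (C : Int) := by
  constructor
  · intro h
    unfold allCells at h
    obtain ⟨i, hi, hmem⟩ := List.mem_flatMap.1 h
    obtain ⟨j, hj, heq⟩ := List.mem_map.1 hmem
    rw [PySem.List.mem_pyRange_one] at hi hj
    injection heq with e1 e2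
    refine ⟨?_, ?_, ?_, ?_⟩ <;> omega
  · rintro ⟨h1, h2, h3, h4⟩
    unfold allCells
    exact List.mem_flatMap.2 ⟨r, PySem.List.mem_pyRange_one.2 ⟨h1, h2⟩,
      List.mem_map.2 ⟨c, PySem.List.mem_pyRange_one.2 ⟨h3, h4⟩, rfl⟩⟩

theorem freeCnt_add_lt (R C : Nat) (v : List (Int × Int)) (r c : Int)
    (h1 : 0 ≤ r) (h2 : r < (R : Int)) (h3 : 0 ≤ c) (h4 : c < (C : Int))
    (h5 : (r, c) ∉ v) :
    freeCnt R C (v ++ [(r, c)]) < freeCnt R C v := by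
  have himp : ∀ a : Int × Int, (decide (a ∉ v ++ [(r, c)])) = true → (decide (a ∉ v)) = true := by
    intro a ha
    simp only [decide_eq_true_eq, List.mem_append] at *
    tauto
  have hlt : ∀ {α : Type} (l : List α) (p q : α → Bool), (∀ a, q a = true → p a = true) →
      ∀ x, x ∈ l → p x = true → ¬ q x = true → (l.filter q).length < (l.filter p).length := by
    intro α l p q himp x hx hpx hqx
    induction l with
    | nil => cases hx
    | cons y l ih =>
      have hle : (l.filter q).length ≤ (l.filter p).length := by
        rw [← List.countP_eq_length_filter, ← List.countP_eq_length_filter]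
        exact List.countP_mono_left (fun a _ => himp a)
      simp only [List.filter_cons]
      rcases List.mem_cons.1 hx with rfl | hx'
      · rw [if_pos hpx, if_neg hqx]
        simpa using Nat.lt_succ_of_le hle
      · by_cases hq : q y = true
        · rw [if_pos (himp y hq), if_pos hq]; simpa using ih hx'
        · have h2 := ih hx'
          rw [if_neg hq]
          by_cases hp : p y = true
          · rw [if_pos hp]; simp; omega
          · rw [if_neg hp]; exact h2
  exact hlt (allCells R C) _ _ himp (r, c) ((mem_allCells R C r c).2 ⟨h1, h2, h3, h4⟩)
    (by simpa using h5) (by simp)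

-- A's recursive `explore`; the Nat argument is fuel making the nested recursion structural — every call in
-- countIslandsA carries rows*cols+1 fuel, more than the cells ever explorable, so it is never exhausted.
def exploreF (g : List (List Int)) : Nat → Int → Int → List (Int × Int) → List (Int × Int)
  | 0, _, _, v => v
  | f + 1, r, c, v =>
    if r < 0 ∨ (g.length : Int) ≤ r ∨ c < 0 ∨ ((g.headD []).length : Int) ≤ c
        ∨ getCell g r c = 0 ∨ (r, c) ∈ v then v
    else
      exploreF g f (r - 1) c (exploreF g f (r + 1) c
        (exploreF g f r (c - 1) (exploreF g f r (c + 1) (PySem.Set.add v (r, c)))))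

-- A's count_islands
def countIslandsA (g : List (List Int)) : Int :=
  ((PySem.List.pyRange 0 (g.length : Int) 1).foldl (fun st r =>
      (PySem.List.pyRange 0 ((g.headD []).length : Int) 1).foldl (fun st c =>
        if getCell g r c = 1 ∧ (r, c) ∉ st.1 then
          (exploreF g (g.length * (g.headD []).length + 1) r c st.1, st.2 + 1)
        else st) st)
    (([] : List (Int × Int)), (0 : Int))).2

-- A's in-place `grid[r][c] = 0` (the pure image of the mutated grid)
def setCell0 (g : List (List Int)) (r c : Int) : List (List Int) :=
  g.mapIdx (fun i row => if (i : Int) = r then row.mapIdx (fun j x => if (j : Int) = c then 0 else x) else row)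

def minDays1 (grid : List (List Int)) : Int :=
  if countIslandsA grid ≠ 1 then 0
  else if (PySem.List.pyRange 0 (grid.length : Int) 1).any (fun r =>
      (PySem.List.pyRange 0 ((grid.headD []).length : Int) 1).any (fun c =>
        decide (getCell grid r c = 1 ∧ countIslandsA (setCell0 grid r c) ≠ 1)))
  then 1 else 2

-- ===== PORT B =====
-- B's `while stack:` loop; head of the Lean list is the top of Python's stack (pop from the end)
def loopB (g : List (List Int)) (skip : Option (Int × Int)) :
    List (Int × Int) → List (Int × Int) → List (Int × Int)
  | [], v => v
  | (r, c) :: stack, v =>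
    if r < 0 ∨ (g.length : Int) ≤ r ∨ c < 0 ∨ ((g.headD []).length : Int) ≤ c
        ∨ skip = some (r, c) ∨ getCell g r c = 0 ∨ (r, c) ∈ v then
      loopB g skip stack v
    else
      loopB g skip ((r, c + 1) :: (r, c - 1) :: (r + 1, c) :: (r - 1, c) :: stack)
        (PySem.Set.add v (r, c))
  termination_by stack v => (freeCnt g.length (g.headD []).length v, stack.length)
  decreasing_by
  · exact Prod.Lex.right _ (by simp)
  · apply Prod.Lex.left
    rename_i h
    simp only [not_or] at h
    obtain ⟨h1, h2, h3, h4, _, _, h7⟩ := h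
    rw [PySem.Set.add_of_not_mem h7]
    exact freeCnt_add_lt _ _ _ _ _ (by omega) (by omega) (by omega) (by omega) h7

-- B's components(skip)
def countB (g : List (List Int)) (skip : Option (Int × Int)) : Int :=
  ((PySem.List.pyRange 0 (g.length : Int) 1).foldl (fun st r0 =>
      (PySem.List.pyRange 0 ((g.headD []).length : Int) 1).foldl (fun st c0 =>
        if getCell g r0 c0 = 1 ∧ ¬ skip = some (r0, c0) ∧ (r0, c0) ∉ st.1 then
          (loopB g skip [(r0, c0)] st.1, st.2 + 1)
        else st) st)
    (([] : List (Int × Int)), (0 : Int))).2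

def minDays1_alt (grid : List (List Int)) : Int :=
  if countB grid none ≠ 1 then 0
  else if (PySem.List.pyRange 0 (grid.length : Int) 1).any (fun r =>
      (PySem.List.pyRange 0 ((grid.headD []).length : Int) 1).any (fun c =>
        decide (getCell grid r c = 1 ∧ countB grid (some (r, c)) ≠ 1)))
  then 1 else 2

-- ===== PRECONDITION & SPEC =====
-- Pre_ excludes exactly the ragged grids on which Python A raises IndexError: A reads every row at all
-- columns 0..len(grid[0])-1, so a row shorter than row 0 crashes it (B's Python crashes there too).
def Pre_minDays1 (grid : List (List Int)) : Prop :=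
  ∀ row ∈ grid, (grid.headD []).length ≤ row.length
instance (grid : List (List Int)) : Decidable (Pre_minDays1 grid) := by unfold Pre_minDays1; infer_instance
def pvWitness_minDays1 : List (List Int) := [[1, 1], [0, 1]]

def Spec_minDays1 (grid : List (List Int)) (out : Int) : Prop := out = minDays1_alt grid
instance (grid : List (List Int)) (out : Int) : Decidable (Spec_minDays1 grid out) := by unfold Spec_minDays1; infer_instance

-- ===== CLAIM (what is proved, stated in full; the proofs are below) =====
def Claim_equal_minDays1 : Prop := ∀ (grid : List (List Int)), Dom_minDays1 grid → Pre_minDays1 grid → Spec_minDays1 grid (minDays1 grid)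

-- ===== LEMMAS AND PROOFS =====

theorem mem_exploreF (g : List (List Int)) (f : Nat) :
    ∀ (r c : Int) (v : List (Int × Int)) (x : Int × Int), x ∈ v → x ∈ exploreF g f r c v := by
  induction f with
  | zero => intro r c v x hx; exact hx
  | succ f ih =>
    intro r c v x hx
    simp only [exploreF]
    split
    · exact hx
    · exact ih _ _ _ _ (ih _ _ _ _ (ih _ _ _ _ (ih _ _ _ _ ((PySem.Set.mem_add _ _ _).2 (Or.inl hx)))))

theorem freeCnt_mono (R C : Nat) (v w : List (Int × Int)) (h : ∀ x ∈ v, x ∈ w) :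
    freeCnt R C w ≤ freeCnt R C v := by
  simp only [freeCnt]
  rw [← List.countP_eq_length_filter, ← List.countP_eq_length_filter]
  apply List.countP_mono_left
  intro a _
  simp only [decide_eq_true_eq]
  intro hw hv
  exact hw (h a hv)

theorem freeCnt_exploreF_le (R C : Nat) (g : List (List Int)) (f : Nat) (r c : Int)
    (v : List (Int × Int)) : freeCnt R C (exploreF g f r c v) ≤ freeCnt R C v :=
  freeCnt_mono R C v _ (fun x hx => mem_exploreF g f r c v x hx)

theorem freeCnt_le (R C : Nat) (v : List (Int × Int)) : freeCnt R C v ≤ R * C := by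
  have h1 : freeCnt R C v ≤ (allCells R C).length := List.length_filter_le _ _
  have h2 : (allCells R C).length = R * C := by
    simp [allCells, List.length_flatMap, PySem.List.length_pyRange_one]
  omega

-- A's guard on the skip-view grid is B's guard on the original grid
theorem guard_iff (g1 g2 : List (List Int)) (skip : Option (Int × Int))
    (hR : g1.length = g2.length)
    (hC : (g1.headD []).length = (g2.headD []).length)
    (hv : ∀ r c : Int, 0 ≤ r → r < (g2.length : Int) → 0 ≤ c → c < ((g2.headD []).length : Int) →
      getCell g1 r c = (if skip = some (r, c) then 0 else getCell g2 r c))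
    (v : List (Int × Int)) (r c : Int) :
    (r < 0 ∨ (g1.length : Int) ≤ r ∨ c < 0 ∨ ((g1.headD []).length : Int) ≤ c
      ∨ getCell g1 r c = 0 ∨ (r, c) ∈ v)
    ↔ (r < 0 ∨ (g2.length : Int) ≤ r ∨ c < 0 ∨ ((g2.headD []).length : Int) ≤ c
      ∨ skip = some (r, c) ∨ getCell g2 r c = 0 ∨ (r, c) ∈ v) := by
  rw [hR, hC]
  by_cases hin : 0 ≤ r ∧ r < (g2.length : Int) ∧ 0 ≤ c ∧ c < ((g2.headD []).length : Int)
  · obtain ⟨a1, a2, a3, a4⟩ := hin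
    have hval := hv r c a1 a2 a3 a4
    by_cases hs : skip = some (r, c)
    · rw [if_pos hs] at hval
      simp [hval, hs]
    · rw [if_neg hs] at hval
      simp [hval, hs]
  · have hout : r < 0 ∨ (g2.length : Int) ≤ r ∨ c < 0 ∨ ((g2.headD []).length : Int) ≤ c := by
      omega
    tauto

-- the central simulation: one pop of B's stack loop runs exactly A's recursive explore
theorem key (g1 g2 : List (List Int)) (skip : Option (Int × Int))
    (hR : g1.length = g2.length)
    (hC : (g1.headD []).length = (g2.headD []).length)
    (hv : ∀ r c : Int, 0 ≤ r → r < (g2.length : Int) → 0 ≤ c → c < ((g2.headD []).length : Int) →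
      getCell g1 r c = (if skip = some (r, c) then 0 else getCell g2 r c)) :
    ∀ (n : Nat) (v : List (Int × Int)) (f : Nat) (r c : Int) (stack : List (Int × Int)),
      freeCnt g2.length (g2.headD []).length v ≤ n →
      freeCnt g2.length (g2.headD []).length v < f →
      loopB g2 skip ((r, c) :: stack) v = loopB g2 skip stack (exploreF g1 f r c v) := by
  intro n
  induction n with
  | zero =>
    intro v f r c stack hn hf
    obtain ⟨f', rfl⟩ : ∃ f', f = f' + 1 := ⟨f - 1, by omega⟩
    by_cases hg : r < 0 ∨ (g2.length : Int) ≤ r ∨ c < 0 ∨ ((g2.headD []).length : Int) ≤ c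
        ∨ skip = some (r, c) ∨ getCell g2 r c = 0 ∨ (r, c) ∈ v
    · have hA : r < 0 ∨ (g1.length : Int) ≤ r ∨ c < 0 ∨ ((g1.headD []).length : Int) ≤ c
          ∨ getCell g1 r c = 0 ∨ (r, c) ∈ v :=
        (guard_iff g1 g2 skip hR hC hv v r c).2 hg
      rw [loopB, if_pos hg]
      simp only [exploreF]
      rw [if_pos hA]
    · exfalso
      simp only [not_or] at hg
      have := freeCnt_add_lt g2.length ((g2.headD []).length) v r c
        (by omega) (by omega) (by omega) (by omega) hg.2.2.2.2.2.2
      omega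
  | succ n ih =>
    intro v f r c stack hn hf
    obtain ⟨f', rfl⟩ : ∃ f', f = f' + 1 := ⟨f - 1, by omega⟩
    by_cases hg : r < 0 ∨ (g2.length : Int) ≤ r ∨ c < 0 ∨ ((g2.headD []).length : Int) ≤ c
        ∨ skip = some (r, c) ∨ getCell g2 r c = 0 ∨ (r, c) ∈ v
    · have hA : r < 0 ∨ (g1.length : Int) ≤ r ∨ c < 0 ∨ ((g1.headD []).length : Int) ≤ c
          ∨ getCell g1 r c = 0 ∨ (r, c) ∈ v :=
        (guard_iff g1 g2 skip hR hC hv v r c).2 hg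
      rw [loopB, if_pos hg]
      simp only [exploreF]
      rw [if_pos hA]
    · have hA : ¬ (r < 0 ∨ (g1.length : Int) ≤ r ∨ c < 0 ∨ ((g1.headD []).length : Int) ≤ c
          ∨ getCell g1 r c = 0 ∨ (r, c) ∈ v) := by
        rw [guard_iff g1 g2 skip hR hC hv v r c]
        exact hg
      simp only [not_or] at hg
      have hnm : (r, c) ∉ v := hg.2.2.2.2.2.2
      have hadd : PySem.Set.add v (r, c) = v ++ [(r, c)] := PySem.Set.add_of_not_mem hnm
      have hlt : freeCnt g2.length ((g2.headD []).length) (v ++ [(r, c)]) <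
          freeCnt g2.length ((g2.headD []).length) v :=
        freeCnt_add_lt _ _ v r c (by omega) (by omega) (by omega) (by omega) hnm
      rw [loopB, if_neg (by simp only [not_or]; exact hg)]
      simp only [exploreF]
      rw [if_neg hA, hadd]
      set v1 := v ++ [(r, c)] with hv1
      have b1 := freeCnt_exploreF_le g2.length ((g2.headD []).length) g1 f' r (c + 1) v1
      set e1 := exploreF g1 f' r (c + 1) v1 with he1
      have b2 := freeCnt_exploreF_le g2.length ((g2.headD []).length) g1 f' r (c - 1) e1
      set e2 := exploreF g1 f' r (c - 1) e1 with he2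
      have b3 := freeCnt_exploreF_le g2.length ((g2.headD []).length) g1 f' (r + 1) c e2
      set e3 := exploreF g1 f' (r + 1) c e2 with he3
      rw [ih v1 f' r (c + 1) _ (by omega) (by omega)]
      rw [ih e1 f' r (c - 1) _ (by omega) (by omega)]
      rw [ih e2 f' (r + 1) c _ (by omega) (by omega)]
      rw [ih e3 f' (r - 1) c _ (by omega) (by omega)]

-- the two island counters agree whenever A's grid is the skip-view of B's grid
theorem count_eq (g1 g2 : List (List Int)) (skip : Option (Int × Int))
    (hR : g1.length = g2.length)
    (hC : (g1.headD []).length = (g2.headD []).length)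
    (hv : ∀ r c : Int, 0 ≤ r → r < (g2.length : Int) → 0 ≤ c → c < ((g2.headD []).length : Int) →
      getCell g1 r c = (if skip = some (r, c) then 0 else getCell g2 r c)) :
    countIslandsA g1 = countB g2 skip := by
  have hRi : (g1.length : Int) = (g2.length : Int) := by exact_mod_cast hR
  have hCi : ((g1.headD []).length : Int) = ((g2.headD []).length : Int) := by exact_mod_cast hC
  unfold countIslandsA countB
  rw [hRi, hCi]
  refine congrArg Prod.snd ?_
  apply PySem.List.foldl_congr_mem
  intro st r hr
  apply PySem.List.foldl_congr_mem
  intro st2 c hc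
  rw [PySem.List.mem_pyRange_one] at hr hc
  have hval := hv r c hr.1 hr.2 hc.1 hc.2
  by_cases hs : skip = some (r, c)
  · rw [if_pos hs] at hval
    rw [if_neg (by simp [hval]), if_neg (by simp [hs])]
  · rw [if_neg hs] at hval
    rw [hval]
    by_cases hcond : getCell g2 r c = 1 ∧ (r, c) ∉ st2.1
    · rw [if_pos hcond, if_pos ⟨hcond.1, hs, hcond.2⟩]
      have hfuel : freeCnt g2.length (g2.headD []).length st2.1 <
          g1.length * (g1.headD []).length + 1 := by
        have hle := freeCnt_le g2.length (g2.headD []).length st2.1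
        rw [hR, hC]
        omega
      have hk := key g1 g2 skip hR hC hv (freeCnt g2.length (g2.headD []).length st2.1)
        st2.1 (g1.length * (g1.headD []).length + 1) r c [] le_rfl hfuel
      rw [show loopB g2 skip [] (exploreF g1 (g1.length * (g1.headD []).length + 1) r c st2.1)
          = exploreF g1 (g1.length * (g1.headD []).length + 1) r c st2.1 from by rw [loopB]] at hk
      rw [hk]
    · rw [if_neg hcond, if_neg (by tauto)]

theorem length_setCell0 (g : List (List Int)) (r c : Int) : (setCell0 g r c).length = g.length := by
  simp [setCell0]

theorem headD_len_setCell0 (g : List (List Int)) (r c : Int) :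
    ((setCell0 g r c).headD []).length = (g.headD []).length := by
  cases g with
  | nil => rfl
  | cons row t =>
    simp only [setCell0, List.mapIdx_cons, List.headD_cons]
    split
    · simp
    · rfl

theorem getCell_setCell0 (g : List (List Int)) (r0 c0 r c : Int)
    (hr0 : 0 ≤ r) (hr : r < (g.length : Int)) (hc0 : 0 ≤ c) :
    getCell (setCell0 g r0 c0) r c = (if (r0, c0) = (r, c) then 0 else getCell g r c) := by
  have hrr : ((r.toNat : Nat) : Int) = r := Int.toNat_of_nonneg hr0
  have hcc : ((c.toNat : Nat) : Int) = c := Int.toNat_of_nonneg hc0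
  have hrn : r.toNat < g.length := by omega
  have hrn2 : r.toNat < (setCell0 g r0 c0).length := by rw [length_setCell0]; exact hrn
  unfold getCell
  rw [PySem.List.pyGet?_of_nonneg (setCell0 g r0 c0) hr0, PySem.List.pyGet?_of_nonneg g hr0,
    List.getElem?_eq_getElem hrn, List.getElem?_eq_getElem hrn2]
  simp only [Option.getD_some]
  have hsc : (setCell0 g r0 c0)[r.toNat] =
      if ((r.toNat : Nat) : Int) = r0 then
        (g[r.toNat]).mapIdx (fun j x => if (j : Int) = c0 then 0 else x)
      else g[r.toNat] := by
    simp [setCell0, List.getElem_mapIdx]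
  rw [hsc, hrr]
  by_cases h : r = r0
  · rw [if_pos h]
    rw [PySem.List.pyGet?_of_nonneg _ hc0, PySem.List.pyGet?_of_nonneg _ hc0]
    by_cases hcl : c.toNat < (g[r.toNat]).length
    · rw [List.getElem?_eq_getElem hcl,
        List.getElem?_eq_getElem (by rw [List.length_mapIdx]; exact hcl)]
      simp only [Option.getD_some, List.getElem_mapIdx, hcc]
      rcases eq_or_ne c c0 with h2 | h2
      · rw [if_pos h2, if_pos (Prod.ext_iff.2 ⟨h.symm, h2.symm⟩)]
      · rw [if_neg (by omega), if_neg (by simp [Prod.ext_iff]; omega)]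
    · have hn1 : (g[r.toNat])[c.toNat]? = none := List.getElem?_eq_none (by omega)
      have hn2 : ((g[r.toNat]).mapIdx (fun j x => if (j : Int) = c0 then 0 else x))[c.toNat]? = none :=
        List.getElem?_eq_none (by rw [List.length_mapIdx]; omega)
      rw [hn1, hn2]
      simp only [Option.getD_none]
      split <;> rfl
  · rw [if_neg h, if_neg (by simp [Prod.ext_iff]; omega)]

theorem minDays1_main (grid : List (List Int)) : minDays1 grid = minDays1_alt grid := by
  unfold minDays1 minDays1_alt
  have h0 : countIslandsA grid = countB grid none :=
    count_eq grid grid none rfl rfl (by intro r c _ _ _ _; simp)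
  rw [h0]
  have hany : (PySem.List.pyRange 0 (grid.length : Int) 1).any (fun r =>
      (PySem.List.pyRange 0 ((grid.headD []).length : Int) 1).any (fun c =>
        decide (getCell grid r c = 1 ∧ countIslandsA (setCell0 grid r c) ≠ 1))) =
      (PySem.List.pyRange 0 (grid.length : Int) 1).any (fun r =>
      (PySem.List.pyRange 0 ((grid.headD []).length : Int) 1).any (fun c =>
        decide (getCell grid r c = 1 ∧ countB grid (some (r, c)) ≠ 1))) := by
    apply PySem.List.any_congr_mem
    intro r hr
    apply PySem.List.any_congr_mem
    intro c hc
    rw [PySem.List.mem_pyRange_one] at hr hc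
    rw [decide_eq_decide]
    by_cases h1 : getCell grid r c = 1
    · have hcnt : countIslandsA (setCell0 grid r c) = countB grid (some (r, c)) := by
        apply count_eq _ _ _ (length_setCell0 grid r c) (headD_len_setCell0 grid r c)
        intro r' c' a1 a2 a3 a4
        rw [getCell_setCell0 grid r c r' c' a1 a2 a3]
        simp [Prod.ext_iff]
      rw [hcnt]
    · simp [h1]
  rw [hany]

-- ===== VERDICT (by name: the statement is the Claim_ definition above) =====
theorem minDays1_spec : Claim_equal_minDays1 := by
  intro grid _ _
  exact minDays1_main grid
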